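-- pv_equiv track=rewrite | github.com/harshini957/Github_pr_review_bot | app/github/client.py | parse_full_diff
-- ===== SOURCE A (Python) =====
-- def parse_full_diff(raw_diff: str) -> dict:
--     import re
--     line_map = {}
--     current_file = None
--     diff_position = 0
--     current_line = 0
--
--     for line in raw_diff.split("\n"):
--
--         if line.startswith("diff --git"):
--             current_file = None
--             current_line = 0
--
--         elif line.startswith("+++ b/"):
--             current_file = line[6:].strip()
--             line_map[current_file] = {}
--             diff_position = 0
--             current_line = 0
--
--         elif line.startswith("@@"):
--             match = re.search(r"\+(\d+)", line)
--             if match: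
--                 current_line = int(match.group(1)) - 1
--             diff_position += 1
--
--         elif current_file is not None:
--
--             # Skip the "no newline at end of file" marker
--             if line.startswith("\\ No newline"):
--                 continue
--
--             diff_position += 1
--
--             if line.startswith("+"):
--                 current_line += 1
--                 line_map[current_file][current_line] = diff_position
--
--             elif line.startswith("-"):
--                 pass
--
--             else:
--                 current_line += 1
--
--     return line_map
-- ===== SOURCE B (Python) =====
-- def _walk_body(lines, mapping, pos, cur_line):
--     for line in lines:
--         if line.startswith("\\ No newline"):
--             continue
--         pos += 1
--         if line.startswith("+"):
--             cur_line += 1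
--             mapping[cur_line] = pos
--         elif line.startswith("-"):
--             pass
--         else:
--             cur_line += 1
--     return mapping, pos, cur_line
--
--
-- def parse_full_diff(raw_diff: str) -> dict:
--     import re
--     # phase 1: partition the diff into per-file sections keyed by the "+++ b/" filename
--     sections = []
--     cur = None
--     for line in raw_diff.split("\n"):
--         if line.startswith("diff --git"):
--             if cur is not None:
--                 sections.append(cur)
--             cur = None
--         elif line.startswith("+++ b/"):
--             if cur is not None:
--                 sections.append(cur)
--             cur = (line[6:].strip(), [])
--         elif cur is not None:
--             cur[1].append(line)
--     if cur is not None: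
--         sections.append(cur)
--
--     line_map = {}
--     for fname, body in sections:
--         # phase 2a: split the section body into hunks at "@@" headers
--         first = []
--         hunks = []
--         curh = None
--         for line in body:
--             if line.startswith("@@"):
--                 if curh is not None:
--                     hunks.append(curh)
--                 m = re.search(r"\+(\d+)", line)
--                 curh = (int(m.group(1)) if m else None, [])
--             elif curh is None:
--                 first.append(line)
--             else:
--                 curh[1].append(line)
--         if curh is not None:
--             hunks.append(curh)
--         # phase 2b: walk the hunks, assigning per-file diff positions
--         mapping, pos, cur_line = _walk_body(first, {}, 0, 0)
--         for start, hbody in hunks: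
--             pos += 1
--             if start is not None:
--                 cur_line = start - 1
--             mapping, pos, cur_line = _walk_body(hbody, mapping, pos, cur_line)
--         line_map[fname] = mapping
--     return line_map
-- ===== Notes on version B (the rewrite author's own statement) =====
-- stated objective: alternative
-- what changed: Replaces A's single flat stateful scan with a two-phase decomposition: the diff is first partitioned into per-file sections keyed by the target filename, and each section into hunks at the hunk headers; a second phase walks the grouped structure hunk-by-hunk to assign diff positions.
import Mathlib
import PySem

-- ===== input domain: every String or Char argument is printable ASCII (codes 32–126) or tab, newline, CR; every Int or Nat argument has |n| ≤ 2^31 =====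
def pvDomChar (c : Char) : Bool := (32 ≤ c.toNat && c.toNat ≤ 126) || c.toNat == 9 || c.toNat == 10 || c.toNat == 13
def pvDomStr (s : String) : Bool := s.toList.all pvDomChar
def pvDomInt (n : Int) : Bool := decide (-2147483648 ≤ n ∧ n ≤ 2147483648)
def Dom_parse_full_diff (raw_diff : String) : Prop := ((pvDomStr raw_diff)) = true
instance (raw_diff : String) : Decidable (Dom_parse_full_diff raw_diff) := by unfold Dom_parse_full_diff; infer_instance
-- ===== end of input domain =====

-- B re-implements the flat stateful scan as a two-phase grouping (file sections, then hunks); return values proved equal, neither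
-- implementation is claimed faster.

-- shared helpers (identical code in both Pythons): re.search(r"\+(\d+)", line) and the "+++ b/" filename extraction
def pvDigitsVal (cs : List Char) : Int :=
  cs.foldl (fun a c => a * 10 + ((c.toNat : Int) - 48)) 0

-- re.search(r"\+(\d+)", line): first '+' immediately followed by a digit; group(1) is the maximal digit run after it
def pvPlusNum : List Char → Option Int
  | [] => none
  | c :: rest =>
    if c == '+' && PySem.Chars.isdigit (rest.headD ' ') then
      some (pvDigitsVal (rest.takeWhile (fun d => PySem.Chars.isdigit d)))
    else pvPlusNum rest

-- line[6:].strip()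
def pvFname (line : String) : String :=
  PySem.Str.strip (PySem.Str.slice line (some 6) none)

-- ===== PORT A =====
-- one step of A's flat scan; state = (line_map, current_file, diff_position, current_line).
-- line_map[current_file][current_line] = diff_position is ported as re-inserting the updated inner dict
-- (current_file is always a key of line_map when current_file ≠ None, so Python's lookup never raises).
def pvStepA :
    (PySem.Dict String (PySem.Dict Int Int) × Option String × Int × Int) → String →
    (PySem.Dict String (PySem.Dict Int Int) × Option String × Int × Int)
  | (lm, cf, dp, cl), line =>
    if PySem.Str.startswith line "diff --git" then (lm, none, dp, 0)
    else if PySem.Str.startswith line "+++ b/" then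
      let f := pvFname line
      (lm.insert f PySem.Dict.empty, some f, 0, 0)
    else if PySem.Str.startswith line "@@" then
      let cl' := match pvPlusNum line.toList with | some n => n - 1 | none => cl
      (lm, cf, dp + 1, cl')
    else
      match cf with
      | none => (lm, none, dp, cl)
      | some f =>
        if PySem.Str.startswith line "\\ No newline" then (lm, some f, dp, cl)
        else if PySem.Str.startswith line "+" then
          (lm.insert f ((lm.getD f PySem.Dict.empty).insert (cl + 1) (dp + 1)), some f, dp + 1, cl + 1)
        else if PySem.Str.startswith line "-" then (lm, some f, dp + 1, cl)
        else (lm, some f, dp + 1, cl + 1)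

def parse_full_diff (raw_diff : String) : List (String × List (Int × Int)) :=
  -- raw_diff.split("\n"): separator is nonempty, so split? is never none
  let lines := (PySem.Str.split? raw_diff "\n").getD []
  let st := lines.foldl pvStepA (PySem.Dict.empty, none, 0, 0)
  st.1.items.map (fun p => (p.1, p.2.items))

-- ===== PORT B =====
-- phase 1: partition into per-file sections keyed by the "+++ b/" filename
def pvSecStep :
    (List (String × List String) × Option (String × List String)) → String →
    (List (String × List String) × Option (String × List String))
  | (done, cur), line =>
    if PySem.Str.startswith line "diff --git" then
      (match cur with | none => done | some s => done ++ [s], none)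
    else if PySem.Str.startswith line "+++ b/" then
      (match cur with | none => done | some s => done ++ [s], some (pvFname line, []))
    else
      match cur with
      | none => (done, none)
      | some (f, b) => (done, some (f, b ++ [line]))

def pvSections (lines : List String) : List (String × List String) :=
  let r := lines.foldl pvSecStep ([], none)
  match r.2 with | none => r.1 | some s => r.1 ++ [s]

-- phase 2a: split a section body into (lines before the first "@@", hunks), each hunk = (parsed +N header, body lines)
def pvHunkStep :
    (List String × List (Option Int × List String) × Option (Option Int × List String)) → String →
    (List String × List (Option Int × List String) × Option (Option Int × List String))
  | (first, hs, curh), line =>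
    if PySem.Str.startswith line "@@" then
      (first, (match curh with | none => hs | some c => hs ++ [c]), some (pvPlusNum line.toList, []))
    else
      match curh with
      | none => (first ++ [line], hs, none)
      | some (h, b) => (first, hs, some (h, b ++ [line]))

def pvHunks (body : List String) : List String × List (Option Int × List String) :=
  let r := body.foldl pvHunkStep ([], [], none)
  (r.1, match r.2.2 with | none => r.2.1 | some c => r.2.1 ++ [c])

-- phase 2b: _walk_body — one body line of a hunk; state = (mapping, pos, cur_line)
def pvBodyStep : (PySem.Dict Int Int × Int × Int) → String → (PySem.Dict Int Int × Int × Int)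
  | (m, pos, cl), line =>
    if PySem.Str.startswith line "\\ No newline" then (m, pos, cl)
    else if PySem.Str.startswith line "+" then (m.insert (cl + 1) (pos + 1), pos + 1, cl + 1)
    else if PySem.Str.startswith line "-" then (m, pos + 1, cl)
    else (m, pos + 1, cl + 1)

-- entering a hunk: pos += 1; if start is not None: cur_line = start - 1
def pvApplyHdr (h : Option Int) (s : PySem.Dict Int Int × Int × Int) : PySem.Dict Int Int × Int × Int :=
  (s.1, s.2.1 + 1, match h with | some n => n - 1 | none => s.2.2)

def pvWalkSec (body : List String) : PySem.Dict Int Int :=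
  let (first, hs) := pvHunks body
  let s1 := first.foldl pvBodyStep (PySem.Dict.empty, 0, 0)
  (hs.foldl (fun s h => h.2.foldl pvBodyStep (pvApplyHdr h.1 s)) s1).1

def parse_full_diff_alt (raw_diff : String) : List (String × List (Int × Int)) :=
  let lines := (PySem.Str.split? raw_diff "\n").getD []
  let lm := (pvSections lines).foldl
    (fun lm fb => lm.insert fb.1 (pvWalkSec fb.2)) PySem.Dict.empty
  lm.items.map (fun p => (p.1, p.2.items))

-- ===== PRECONDITION & SPEC =====
def Spec_parse_full_diff (raw_diff : String) (out : List (String × List (Int × Int))) : Prop := out = parse_full_diff_alt raw_diff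
instance (raw_diff : String) (out : List (String × List (Int × Int))) : Decidable (Spec_parse_full_diff raw_diff out) := by unfold Spec_parse_full_diff; infer_instance

-- ===== CLAIM (what is proved, stated in full; the proofs are below) =====
def Claim_equal_parse_full_diff : Prop := ∀ (raw_diff : String), Dom_parse_full_diff raw_diff → Spec_parse_full_diff raw_diff (parse_full_diff raw_diff)

-- ===== LEMMAS AND PROOFS =====

-- reference step inside a section: A's body-line handling including "@@" headers
def pvFlatStep (s : PySem.Dict Int Int × Int × Int) (line : String) : PySem.Dict Int Int × Int × Int :=
  if PySem.Str.startswith line "@@" then pvApplyHdr (pvPlusNum line.toList) s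
  else pvBodyStep s line

-- reference "section splitter": pvS ls = (body of a currently open section, list of the later sections)
def pvS : List String → List String × List (String × List String)
  | [] => ([], [])
  | l :: ls =>
    if PySem.Str.startswith l "diff --git" then ([], (pvS ls).2)
    else if PySem.Str.startswith l "+++ b/" then ([], (pvFname l, (pvS ls).1) :: (pvS ls).2)
    else (l :: (pvS ls).1, (pvS ls).2)

-- reference hunk splitter: pvG body = (lines before the first "@@", hunks)
def pvG : List String → List String × List (Option Int × List String)
  | [] => ([], [])
  | l :: ls =>
    if PySem.Str.startswith l "@@" then ([], (pvPlusNum l.toList, (pvG ls).1) :: (pvG ls).2)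
    else (l :: (pvG ls).1, (pvG ls).2)

-- reference result function: process remaining lines given the finished map and the open section (name, walk state)
def pvR : List String → PySem.Dict String (PySem.Dict Int Int) →
    Option (String × (PySem.Dict Int Int × Int × Int)) → PySem.Dict String (PySem.Dict Int Int)
  | [], lm, none => lm
  | [], lm, some (f, s) => lm.insert f s.1
  | l :: ls, lm, st =>
    if PySem.Str.startswith l "diff --git" then
      pvR ls (match st with | none => lm | some (f, s) => lm.insert f s.1) none
    else if PySem.Str.startswith l "+++ b/" then
      pvR ls (match st with | none => lm | some (f, s) => lm.insert f s.1)
        (some (pvFname l, (PySem.Dict.empty, 0, 0)))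
    else
      match st with
      | none => pvR ls lm none
      | some (f, s) => pvR ls lm (some (f, pvFlatStep s l))

-- inserting into line_map under A
def pvIns (lm : PySem.Dict String (PySem.Dict Int Int)) (fb : String × List String) :
    PySem.Dict String (PySem.Dict Int Int) :=
  lm.insert fb.1 (fb.2.foldl pvFlatStep (PySem.Dict.empty, 0, 0)).1

-- A's fold equals the reference function pvR
theorem pvA_eq_R (ls : List String) :
    (∀ lm dp cl, (ls.foldl pvStepA (lm, none, dp, cl)).1 = pvR ls lm none) ∧
    (∀ lm f m dp cl, (ls.foldl pvStepA (lm.insert f m, some f, dp, cl)).1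
        = pvR ls lm (some (f, (m, dp, cl)))) := by
  induction ls with
  | nil => exact ⟨fun lm dp cl => rfl, fun lm f m dp cl => rfl⟩
  | cons l ls ih =>
    constructor
    · intro lm dp cl
      simp only [List.foldl_cons, pvStepA, pvR]
      by_cases h1 : PySem.Str.startswith l "diff --git" = true
      · simp only [h1, if_true]; exact ih.1 lm dp 0
      · simp only [Bool.not_eq_true] at h1; simp only [h1, Bool.false_eq_true, if_false]
        by_cases h2 : PySem.Str.startswith l "+++ b/" = true
        · simp only [h2, if_true]
          exact ih.2 lm (pvFname l) PySem.Dict.empty 0 0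
        · simp only [Bool.not_eq_true] at h2; simp only [h2, Bool.false_eq_true, if_false]
          by_cases h3 : PySem.Str.startswith l "@@" = true
          · simp only [h3, if_true]; exact ih.1 lm (dp + 1) _
          · simp only [Bool.not_eq_true] at h3; simp only [h3, Bool.false_eq_true, if_false]; exact ih.1 lm dp cl
    · intro lm f m dp cl
      simp only [List.foldl_cons, pvStepA, pvR]
      by_cases h1 : PySem.Str.startswith l "diff --git" = true
      · simp only [h1, if_true]; exact ih.1 (lm.insert f m) dp 0
      · simp only [Bool.not_eq_true] at h1; simp only [h1, Bool.false_eq_true, if_false]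
        by_cases h2 : PySem.Str.startswith l "+++ b/" = true
        · simp only [h2, if_true]
          exact ih.2 (lm.insert f m) (pvFname l) PySem.Dict.empty 0 0
        · simp only [Bool.not_eq_true] at h2; simp only [h2, Bool.false_eq_true, if_false]
          by_cases h3 : PySem.Str.startswith l "@@" = true
          · simp only [h3, if_true, pvFlatStep, pvApplyHdr]
            exact ih.2 lm f m (dp + 1) _
          · simp only [Bool.not_eq_true] at h3; simp only [h3, Bool.false_eq_true, if_false, pvFlatStep, pvBodyStep]
            by_cases h4 : PySem.Str.startswith l "\\ No newline" = true
            · simp only [h4, if_true]; exact ih.2 lm f m dp cl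
            · simp only [Bool.not_eq_true] at h4; simp only [h4, Bool.false_eq_true, if_false]
              by_cases h5 : PySem.Str.startswith l "+" = true
              · simp only [h5, if_true, PySem.Dict.getD_insert_self,
                  PySem.Dict.insert_insert_self]
                exact ih.2 lm f (m.insert (cl + 1) (dp + 1)) (dp + 1) (cl + 1)
              · simp only [Bool.not_eq_true] at h5; simp only [h5, Bool.false_eq_true, if_false]
                by_cases h6 : PySem.Str.startswith l "-" = true
                · simp only [h6, if_true]; exact ih.2 lm f m (dp + 1) cl
                · simp only [Bool.not_eq_true] at h6; simp only [h6, Bool.false_eq_true, if_false]; exact ih.2 lm f m (dp + 1) (cl + 1)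

-- the reference function in terms of the section splitter pvS
theorem pvR_eq_S (ls : List String) :
    (∀ lm, pvR ls lm none = (pvS ls).2.foldl pvIns lm) ∧
    (∀ lm f s, pvR ls lm (some (f, s))
        = (pvS ls).2.foldl pvIns (lm.insert f (((pvS ls).1).foldl pvFlatStep s).1)) := by
  induction ls with
  | nil => exact ⟨fun lm => rfl, fun lm f s => rfl⟩
  | cons l ls ih =>
    constructor
    · intro lm
      simp only [pvR, pvS]
      by_cases h1 : PySem.Str.startswith l "diff --git" = true
      · simp only [h1, if_true]; exact ih.1 lm
      · simp only [Bool.not_eq_true] at h1; simp only [h1, Bool.false_eq_true, if_false]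
        by_cases h2 : PySem.Str.startswith l "+++ b/" = true
        · simp only [h2, if_true, List.foldl_cons]
          exact ih.2 lm (pvFname l) (PySem.Dict.empty, 0, 0)
        · simp only [Bool.not_eq_true] at h2; simp only [h2, Bool.false_eq_true, if_false]; exact ih.1 lm
    · intro lm f s
      simp only [pvR, pvS]
      by_cases h1 : PySem.Str.startswith l "diff --git" = true
      · simp only [h1, if_true, List.foldl_nil]; exact ih.1 (lm.insert f s.1)
      · simp only [Bool.not_eq_true] at h1; simp only [h1, Bool.false_eq_true, if_false]
        by_cases h2 : PySem.Str.startswith l "+++ b/" = true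
        · simp only [h2, if_true, List.foldl_cons, List.foldl_nil]
          have := ih.2 (lm.insert f s.1) (pvFname l) (PySem.Dict.empty, 0, 0)
          simpa [pvIns] using this
        · simp only [Bool.not_eq_true] at h2; simp only [h2, Bool.false_eq_true, if_false, List.foldl_cons]
          exact ih.2 lm f (pvFlatStep s l)

-- phase 1 of B computes exactly (pvS ls).2
theorem pvSecFold_eq_S (ls : List String) :
    (∀ done,
      (let r := ls.foldl pvSecStep (done, none)
       match r.2 with | none => r.1 | some s => r.1 ++ [s])
      = done ++ (pvS ls).2) ∧
    (∀ done f b,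
      (let r := ls.foldl pvSecStep (done, some (f, b))
       match r.2 with | none => r.1 | some s => r.1 ++ [s])
      = done ++ (f, b ++ (pvS ls).1) :: (pvS ls).2) := by
  induction ls with
  | nil => exact ⟨fun done => by simp [pvS], fun done f b => by simp [pvS]⟩
  | cons l ls ih =>
    constructor
    · intro done
      simp only [List.foldl_cons, pvSecStep, pvS]
      by_cases h1 : PySem.Str.startswith l "diff --git" = true
      · simp only [h1, if_true]; exact ih.1 done
      · simp only [Bool.not_eq_true] at h1; simp only [h1, Bool.false_eq_true, if_false]
        by_cases h2 : PySem.Str.startswith l "+++ b/" = true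
        · simp only [h2, if_true]
          simpa using ih.2 done (pvFname l) []
        · simp only [Bool.not_eq_true] at h2; simp only [h2, Bool.false_eq_true, if_false]; exact ih.1 done
    · intro done f b
      simp only [List.foldl_cons, pvSecStep, pvS]
      by_cases h1 : PySem.Str.startswith l "diff --git" = true
      · simp only [h1, if_true]
        rw [ih.1 (done ++ [(f, b)])]; simp
      · simp only [Bool.not_eq_true] at h1; simp only [h1, Bool.false_eq_true, if_false]
        by_cases h2 : PySem.Str.startswith l "+++ b/" = true
        · simp only [h2, if_true]
          rw [ih.2 (done ++ [(f, b)]) (pvFname l) []]; simp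
        · simp only [Bool.not_eq_true] at h2; simp only [h2, Bool.false_eq_true, if_false]
          rw [ih.2 done f (b ++ [l])]; simp

theorem pvSections_eq_S (ls : List String) : pvSections ls = (pvS ls).2 := by
  simpa [pvSections] using (pvSecFold_eq_S ls).1 []

-- phase 2a of B computes exactly pvG
theorem pvHunkFold_eq_G (ls : List String) :
    (∀ first,
      (let r := ls.foldl pvHunkStep (first, [], none)
       (r.1, match r.2.2 with | none => r.2.1 | some c => r.2.1 ++ [c]))
      = (first ++ (pvG ls).1, (pvG ls).2)) ∧
    (∀ first hs h b,
      (let r := ls.foldl pvHunkStep (first, hs, some (h, b))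
       (r.1, match r.2.2 with | none => r.2.1 | some c => r.2.1 ++ [c]))
      = (first, hs ++ (h, b ++ (pvG ls).1) :: (pvG ls).2)) := by
  induction ls with
  | nil => exact ⟨fun first => by simp [pvG], fun first hs h b => by simp [pvG]⟩
  | cons l ls ih =>
    constructor
    · intro first
      simp only [List.foldl_cons, pvHunkStep, pvG]
      by_cases h1 : PySem.Str.startswith l "@@" = true
      · simp only [h1, if_true]
        simpa using ih.2 first [] (pvPlusNum l.toList) []
      · simp only [Bool.not_eq_true] at h1; simp only [h1, Bool.false_eq_true, if_false]
        rw [ih.1 (first ++ [l])]; simp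
    · intro first hs h b
      simp only [List.foldl_cons, pvHunkStep, pvG]
      by_cases h1 : PySem.Str.startswith l "@@" = true
      · simp only [h1, if_true]
        rw [ih.2 first (hs ++ [(h, b)]) (pvPlusNum l.toList) []]; simp
      · simp only [Bool.not_eq_true] at h1; simp only [h1, Bool.false_eq_true, if_false]
        rw [ih.2 first hs h (b ++ [l])]; simp

theorem pvHunks_eq_G (body : List String) : pvHunks body = pvG body := by
  simpa [pvHunks] using (pvHunkFold_eq_G body).1 []

-- walking the grouped hunks equals the flat walk
theorem pvWalkG_eq_flat (body : List String) :
    ∀ s, (pvG body).2.foldl (fun s h => h.2.foldl pvBodyStep (pvApplyHdr h.1 s))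
          (((pvG body).1).foldl pvBodyStep s)
      = body.foldl pvFlatStep s := by
  induction body with
  | nil => intro s; rfl
  | cons l ls ih =>
    intro s
    simp only [pvG, List.foldl_cons, pvFlatStep]
    by_cases h1 : PySem.Str.startswith l "@@" = true
    · simp only [h1, if_true, List.foldl_cons, List.foldl_nil]
      exact ih (pvApplyHdr (pvPlusNum l.toList) s)
    · simp only [Bool.not_eq_true] at h1; simp only [h1, Bool.false_eq_true, if_false, List.foldl_cons]
      exact ih (pvBodyStep s l)

theorem pvWalkSec_eq_flat (body : List String) :
    pvWalkSec body = (body.foldl pvFlatStep (PySem.Dict.empty, 0, 0)).1 := by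
  simp only [pvWalkSec, pvHunks_eq_G]
  rw [pvWalkG_eq_flat body (PySem.Dict.empty, 0, 0)]

-- ===== VERDICT (by name: the statement is the Claim_ definition above) =====
theorem parse_full_diff_spec : Claim_equal_parse_full_diff := by
  intro raw_diff _
  unfold Spec_parse_full_diff parse_full_diff parse_full_diff_alt
  set ls := (PySem.Str.split? raw_diff "\n").getD [] with hls
  have hA : (ls.foldl pvStepA (PySem.Dict.empty, none, 0, 0)).1
      = (pvS ls).2.foldl pvIns PySem.Dict.empty := by
    rw [(pvA_eq_R ls).1 PySem.Dict.empty 0 0, (pvR_eq_S ls).1 PySem.Dict.empty]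
  have hB : (pvSections ls).foldl (fun lm fb => lm.insert fb.1 (pvWalkSec fb.2)) PySem.Dict.empty
      = (pvS ls).2.foldl pvIns PySem.Dict.empty := by
    rw [pvSections_eq_S]
    simp only [pvWalkSec_eq_flat]
    rfl
  simp only [hA, hB]
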